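-- pv_equiv track=rewrite | github.com/hippie-cycling/CBFT | scripts/Gromark_transposition.py | create_keyed_alphabet
-- ===== SOURCE A (Python) =====
-- def create_keyed_alphabet(keyword: str, alphabet: str = "ABCDEFGHIJKLMNOPQRSTUVWXYZ") -> str:
--     keyword = ''.join(dict.fromkeys(keyword.upper()))
--     remaining = ''.join(c for c in alphabet if c not in keyword)
--     base = keyword + remaining
--     cols = len(keyword)
--     if cols == 0: return alphabet
--     rows = (len(base) + cols - 1) // cols
--     block = [['' for _ in range(cols)] for _ in range(rows)]
--     idx = 0
--     for i in range(rows):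
--         for j in range(cols):
--             if idx < len(base):
--                 block[i][j] = base[idx]
--                 idx += 1
--
--     sorted_keyword_with_indices = sorted([(char, i) for i, char in enumerate(keyword)])
--     final_col_order = [i for char, i in sorted_keyword_with_indices]
--
--     return ''.join(
--         block[row][col]
--         for col in final_col_order
--         for row in range(rows)
--         if row < len(block) and col < len(block[row]) and block[row][col]
--     )
-- ===== SOURCE B (Python) =====
-- def create_keyed_alphabet(keyword: str, alphabet: str = "ABCDEFGHIJKLMNOPQRSTUVWXYZ") -> str:
--     keyword = ''.join(dict.fromkeys(keyword.upper()))
--     cols = len(keyword)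
--     if cols == 0:
--         return alphabet
--     base = keyword + ''.join(c for c in alphabet if c not in keyword)
--     order = [i for _, i in sorted((c, i) for i, c in enumerate(keyword))]
--     return ''.join(base[i] for col in order for i in range(col, len(base), cols))
-- ===== Notes on version B (the rewrite author's own statement) =====
-- stated objective: simpler
-- what changed: Column j of A's row-major grid is exactly the stride subsequence base[j], base[j+cols], ...; B reads those indices directly with range(col, len(base), cols), eliminating the 2D grid, the nested fill loop with its running idx, and the empty-cell filtering.
import Mathlib
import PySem

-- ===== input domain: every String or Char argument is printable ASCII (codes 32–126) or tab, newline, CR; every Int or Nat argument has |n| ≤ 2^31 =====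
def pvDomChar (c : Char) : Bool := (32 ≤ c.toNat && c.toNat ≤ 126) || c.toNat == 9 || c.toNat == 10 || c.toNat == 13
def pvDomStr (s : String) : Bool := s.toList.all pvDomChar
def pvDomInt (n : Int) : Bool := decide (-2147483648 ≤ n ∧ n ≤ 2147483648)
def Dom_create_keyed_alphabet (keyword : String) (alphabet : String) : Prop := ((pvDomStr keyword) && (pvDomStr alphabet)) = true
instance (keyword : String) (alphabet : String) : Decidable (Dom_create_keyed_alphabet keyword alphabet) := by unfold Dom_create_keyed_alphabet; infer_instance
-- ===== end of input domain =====

-- B replaces A's 2D grid (row-major fill with a running idx, then a filtered column read)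
-- by reading the stride indices range(col, len(base), cols) of base directly; objective: simpler
-- (and measurably faster by a constant factor: no grid is materialized).

-- ===== PORT A =====
-- shared by both Pythons line for line: keyword = ''.join(dict.fromkeys(keyword.upper()))
def pvKw (keyword : String) : List Char := PySem.List.dedup (PySem.Chars.upper keyword.toList)
-- ''.join(c for c in alphabet if c not in keyword)   ('c not in keyword': 1-char substring test)
def pvRemaining (kw : List Char) (alphabet : String) : List Char :=
  alphabet.toList.filter (fun c => !(PySem.Chars.isIn [c] kw))
-- sorted((char, i) pairs of enumerate(keyword)), then keep the indices.  Python sorts the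
-- tuples lexicographically; kw is deduplicated so first components are distinct and the stable
-- sort by first component computes exactly the same list.
def pvOrder (kw : List Char) : List Int :=
  (PySem.List.sorted ((PySem.List.enumerate kw).map (fun p => (p.2, p.1))) (fun p => p.1)).map
    (fun p => p.2)

def create_keyed_alphabet (keyword : String) (alphabet : String) : String :=
  let kw := pvKw keyword
  let remaining := pvRemaining kw alphabet
  let base := kw ++ remaining
  let cols := kw.length
  if cols = 0 then alphabet else
    let rows := (base.length + cols - 1) / cols
    -- block = [['' for _ in range(cols)] for _ in range(rows)]; nested fill loop with idx
    let st := (PySem.List.pyRange 0 (rows : Int) 1).foldl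
      (fun st i => (PySem.List.pyRange 0 (cols : Int) 1).foldl
        (fun st j =>
          if st.2 < (base.length : Int) then
            (PySem.List.pySetD st.1 i
              (PySem.List.pySetD (PySem.List.pyGetD st.1 i [])
                j (String.ofList [PySem.List.pyGetD base st.2 ' '])), st.2 + 1)
          else st) st)
      ((List.range rows).map (fun _ => (List.range cols).map (fun _ => "")), (0 : Int))
    let block := st.1
    -- ''.join(block[row][col] for col in final_col_order for row in range(rows) if ...)
    String.ofList ((pvOrder kw).foldl
      (fun acc col => (PySem.List.pyRange 0 (rows : Int) 1).foldl
        (fun acc2 row =>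
          if row < (block.length : Int) ∧ col < ((PySem.List.pyGetD block row []).length : Int) ∧
              PySem.List.pyGetD (PySem.List.pyGetD block row []) col "" ≠ "" then
            acc2 ++ (PySem.List.pyGetD (PySem.List.pyGetD block row []) col "").toList
          else acc2) acc) [])

-- ===== PORT B =====
def create_keyed_alphabet_alt (keyword : String) (alphabet : String) : String :=
  let kw := pvKw keyword
  let cols := kw.length
  if cols = 0 then alphabet else
    let base := kw ++ pvRemaining kw alphabet
    -- ''.join(base[i] for col in order for i in range(col, len(base), cols))
    String.ofList ((pvOrder kw).foldl
      (fun acc col =>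
        acc ++ (PySem.List.pyRange col (base.length : Int) (cols : Int)).map
          (fun i => PySem.List.pyGetD base i ' ')) [])

-- ===== PRECONDITION & SPEC =====
def Spec_create_keyed_alphabet (keyword : String) (alphabet : String) (out : String) : Prop := out = create_keyed_alphabet_alt keyword alphabet
instance (keyword : String) (alphabet : String) (out : String) : Decidable (Spec_create_keyed_alphabet keyword alphabet out) := by unfold Spec_create_keyed_alphabet; infer_instance

-- ===== CLAIM (what is proved, stated in full; the proofs are below) =====
def Claim_equal_create_keyed_alphabet : Prop := ∀ (keyword : String) (alphabet : String), Dom_create_keyed_alphabet keyword alphabet → Spec_create_keyed_alphabet keyword alphabet (create_keyed_alphabet keyword alphabet)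

-- ===== LEMMAS AND PROOFS =====

-- the empty row and the final content of row i of A's block
def pvBlank (cols : Nat) : List String := (List.range cols).map (fun _ => "")

def pvRowF (base : List Char) (cols i : Nat) : List String :=
  (List.range cols).map (fun j =>
    if i * cols + j < base.length then String.ofList [base.getD (i * cols + j) ' '] else "")

-- row i after its first m cells have been visited, the fill pointer having started at idx0
def pvRowPart (base : List Char) (cols idx0 m : Nat) : List String :=
  (List.range cols).map (fun j =>
    if j < m ∧ idx0 + j < base.length then String.ofList [base.getD (idx0 + j) ' '] else "")

lemma pv_pyRangePos_nil (a b s : Int) (hs : 0 < s) (h : b ≤ a) :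
    PySem.List.pyRange a b s = [] := by
  rw [PySem.List.pyRange_of_pos a b hs]
  simp [show ¬ a < b by omega]

lemma pv_pyRangePos_cons (a b s : Int) (hs : 0 < s) (h : a < b) :
    PySem.List.pyRange a b s = a :: PySem.List.pyRange (a + s) b s := by
  rw [PySem.List.pyRange_of_pos a b hs, PySem.List.pyRange_of_pos (a + s) b hs]
  have hkey : b - a + s - 1 = (b - a - 1) + 1 * s := by ring
  by_cases h2 : a + s < b
  · have h1 : (b - a + s - 1) / s = (b - a - 1) / s + 1 := by
      rw [hkey, Int.add_mul_ediv_right _ _ (by omega)]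
    have hnn : 0 ≤ (b - a - 1) / s := Int.ediv_nonneg (by omega) (by omega)
    have hN : ((b - a + s - 1) / s).toNat = ((b - (a + s) + s - 1) / s).toNat + 1 := by
      rw [h1]
      have : b - (a + s) + s - 1 = b - a - 1 := by ring
      rw [this]
      omega
    simp only [h2, if_pos, if_pos h, hN, List.range_succ_eq_map, List.map_cons, List.map_map]
    congr 1
    · simp
    · apply List.map_congr_left
      intro k _
      simp only [Function.comp_apply]
      push_cast
      ring
  · have hz : (b - a - 1) / s = 0 := Int.ediv_eq_zero_of_lt (by omega) (by omega)
    have hN : ((b - a + s - 1) / s).toNat = 1 := by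
      rw [hkey, Int.add_mul_ediv_right _ _ (by omega), hz]
      norm_num
    simp [h, h2, hN, List.range_succ]

-- the nested fill step only touches row i of the block
lemma pv_localize (L : List Int) (n : Int) (v : Int → String) (i : Int) (hi : 0 ≤ i) :
    ∀ (B : List (List String)) (idx : Int), i.toNat < B.length →
    L.foldl (fun st j =>
        if st.2 < n then
          (PySem.List.pySetD st.1 i (PySem.List.pySetD (PySem.List.pyGetD st.1 i []) j (v st.2)),
            st.2 + 1)
        else st) (B, idx)
    = (PySem.List.pySetD B i
        (L.foldl (fun st j => if st.2 < n then (PySem.List.pySetD st.1 j (v st.2), st.2 + 1) else st)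
          (PySem.List.pyGetD B i [], idx)).1,
       (L.foldl (fun st j => if st.2 < n then (PySem.List.pySetD st.1 j (v st.2), st.2 + 1) else st)
          (PySem.List.pyGetD B i [], idx)).2) := by
  induction L with
  | nil =>
    intro B idx hlen
    simp only [List.foldl_nil]
    rw [PySem.List.pySetD_of_nonneg _ _ hi, PySem.List.pyGetD_of_nonneg _ _ hi,
      List.getD_eq_getElem _ _ hlen, List.set_getElem_self]
  | cons j L ih =>
    intro B idx hlen
    simp only [List.foldl_cons]
    by_cases hcond : idx < n
    · simp only [hcond, if_pos]
      rw [ih _ _ (by rw [PySem.List.length_pySetD]; exact hlen)]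
      have hget : ∀ x : List String,
          PySem.List.pyGetD (PySem.List.pySetD B i x) i [] = x := by
        intro x
        rw [PySem.List.pySetD_of_nonneg _ _ hi, PySem.List.pyGetD_of_nonneg _ _ hi,
          List.getD_eq_getElem _ _ (by simpa using hlen), List.getElem_set_self]
      have hss : ∀ x y : List String,
          PySem.List.pySetD (PySem.List.pySetD B i x) i y = PySem.List.pySetD B i y := by
        intro x y
        simp only [PySem.List.pySetD_of_nonneg _ _ hi]
        rw [List.set_set]
      rw [hget, hss]
    · simp only [hcond, if_neg, not_false_iff]
      exact ih _ _ hlen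

-- filling one blank row, with the fill pointer starting at idx0 ≤ len(base)
lemma pv_rowfill (base : List Char) (cols idx0 : Nat) (h0 : idx0 ≤ base.length) :
    ∀ m, m ≤ cols →
    (PySem.List.pyRange 0 (m : Int) 1).foldl
      (fun st j =>
        if st.2 < (base.length : Int) then
          (PySem.List.pySetD st.1 j (String.ofList [PySem.List.pyGetD base st.2 ' ']), st.2 + 1)
        else st)
      (pvBlank cols, (idx0 : Int))
    = (pvRowPart base cols idx0 m, ((min (idx0 + m) base.length : Nat) : Int)) := by
  intro m
  induction m with
  | zero =>
    intro _
    rw [show ((0 : Nat) : Int) = 0 by norm_num, pv_pyRangePos_nil 0 0 1 (by omega) (by omega)]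
    simp only [List.foldl_nil, Prod.mk.injEq]
    constructor
    · simp [pvBlank, pvRowPart]
    · omega
  | succ m ih =>
    intro hm
    have hcast : ((m + 1 : Nat) : Int) = (m : Int) + 1 := by push_cast; ring
    rw [hcast, PySem.List.pyRange_one_succ_right (by positivity), List.foldl_append,
      ih (by omega)]
    simp only [List.foldl_cons, List.foldl_nil]
    by_cases hfill : idx0 + m < base.length
    · have hmin : min (idx0 + m) base.length = idx0 + m := by omega
      rw [hmin]
      simp only [show ((idx0 + m : Nat) : Int) < (base.length : Int) by exact_mod_cast hfill,
        if_pos]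
      rw [PySem.List.pySetD_of_nonneg _ _ (by positivity), Prod.mk.injEq]
      constructor
      · apply List.ext_getElem
        · simp [pvRowPart]
        · intro j hj _
          have hjc : j < cols := by simpa [pvRowPart] using hj
          have hmc : m < cols := by omega
          rw [List.getElem_set]
          simp only [pvRowPart, List.getElem_map, List.getElem_range,
            PySem.List.pyGetD_natCast, Int.toNat_natCast]
          by_cases hjm : m = j
          · subst hjm
            simp [hfill, List.getD]
          · simp only [hjm, if_neg, not_false_iff]
            have : (j < m ∧ idx0 + j < base.length) ↔ (j < m + 1 ∧ idx0 + j < base.length) := by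
              omega
            rw [if_congr this rfl rfl]
      · push_cast
        omega
    · have hmin : min (idx0 + m) base.length = base.length := by omega
      rw [hmin]
      simp only [show ¬ ((base.length : Nat) : Int) < (base.length : Int) by omega, if_neg,
        not_false_iff]
      rw [Prod.mk.injEq]
      constructor
      · unfold pvRowPart
        apply List.map_congr_left
        intro j _
        have : (j < m ∧ idx0 + j < base.length) ↔ (j < m + 1 ∧ idx0 + j < base.length) := by
          omega
        rw [if_congr this rfl rfl]
      · omega

-- the whole fill loop: after k rows, rows < k carry their final content, idx = min(k*cols, len)
lemma pv_fill (base : List Char) (cols rows : Nat) (hc : 0 < cols) :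
    ∀ k, k ≤ rows →
    (PySem.List.pyRange 0 (k : Int) 1).foldl
      (fun st i => (PySem.List.pyRange 0 (cols : Int) 1).foldl
        (fun st j =>
          if st.2 < (base.length : Int) then
            (PySem.List.pySetD st.1 i
              (PySem.List.pySetD (PySem.List.pyGetD st.1 i [])
                j (String.ofList [PySem.List.pyGetD base st.2 ' '])), st.2 + 1)
          else st) st)
      ((List.range rows).map (fun _ => (List.range cols).map (fun _ => "")), (0 : Int))
    = ((List.range rows).map (fun i => if i < k then pvRowF base cols i else pvBlank cols),
       ((min (k * cols) base.length : Nat) : Int)) := by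
  intro k
  induction k with
  | zero =>
    intro _
    rw [show ((0 : Nat) : Int) = 0 by norm_num, pv_pyRangePos_nil 0 0 1 (by omega) (by omega)]
    simp [pvBlank]
  | succ k ih =>
    intro hk
    have hcast : ((k + 1 : Nat) : Int) = (k : Int) + 1 := by push_cast; ring
    rw [hcast, PySem.List.pyRange_one_succ_right (by positivity), List.foldl_append,
      ih (by omega)]
    simp only [List.foldl_cons, List.foldl_nil]
    rw [pv_localize (PySem.List.pyRange 0 (cols : Int) 1) ((base.length : Int))
      (fun t => String.ofList [PySem.List.pyGetD base t ' ']) ((k : Nat) : Int)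
      (by positivity) _ _ (by simp; omega)]
    have hrowget : PySem.List.pyGetD
        ((List.range rows).map (fun i => if i < k then pvRowF base cols i else pvBlank cols))
        (k : Int) [] = pvBlank cols := by
      rw [PySem.List.pyGetD_of_nonneg _ _ (by positivity), Int.toNat_natCast,
        List.getD_eq_getElem _ _ (by simp; omega)]
      simp
    rw [hrowget, pv_rowfill base cols (min (k * cols) base.length) (by omega) cols (le_refl _)]
    rw [PySem.List.pySetD_of_nonneg _ _ (by positivity), Int.toNat_natCast, Prod.mk.injEq]
    constructor
    · apply List.ext_getElem
      · simp
      · intro i hi _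
        have hik : i < rows := by simpa using hi
        rw [List.getElem_set]
        simp only [List.getElem_map, List.getElem_range]
        by_cases hki : k = i
        · subst hki
          simp only [Nat.lt_succ_self, if_pos]
          unfold pvRowPart pvRowF
          apply List.map_congr_left
          intro j hj
          have hjc : j < cols := List.mem_range.mp hj
          by_cases hkl : k * cols ≤ base.length
          · have : min (k * cols) base.length = k * cols := by omega
            rw [this]
            have : (j < cols ∧ k * cols + j < base.length) ↔ (k * cols + j < base.length) := by
              omega
            rw [if_congr this rfl rfl]
          · have hmin : min (k * cols) base.length = base.length := by omega
            rw [hmin]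
            have h1 : ¬ (j < cols ∧ base.length + j < base.length) := by omega
            have h2 : ¬ (k * cols + j < base.length) := by omega
            rw [if_neg h1, if_neg h2]
        · simp only [hki, if_neg, not_false_iff]
          have : (i < k) ↔ (i < k + 1) := by omega
          rw [if_congr this rfl rfl]
    · have hmul : (k + 1) * cols = k * cols + cols := by ring
      have hmin2 : min (min (k * cols) base.length + cols) base.length
           = min ((k + 1) * cols) base.length := by omega
      show ((min (min (k * cols) base.length + cols) base.length : Nat) : Int)
         = ((min ((k + 1) * cols) base.length : Nat) : Int)
      exact_mod_cast hmin2

-- reading one column: rows 0..r-1 at stride cols, guarded by < len, is the pyRange slice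
lemma pv_colEq (base : List Char) (cols : Nat) (hc : 0 < cols) :
    ∀ (r col : Nat) (acc : List Char), base.length ≤ col + r * cols →
    (List.range r).foldl
      (fun acc2 i => if i * cols + col < base.length then acc2 ++ [base.getD (i * cols + col) ' ']
        else acc2) acc
    = acc ++ (PySem.List.pyRange (col : Int) (base.length : Int) (cols : Int)).map
        (fun i => PySem.List.pyGetD base i ' ') := by
  intro r
  induction r with
  | zero =>
    intro col acc hcov
    rw [pv_pyRangePos_nil _ _ _ (by exact_mod_cast hc) (by simp at hcov ⊢; omega)]
    simp
  | succ r ih =>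
    intro col acc hcov
    have hexp : (r + 1) * cols = r * cols + cols := by ring
    rw [List.range_succ_eq_map, List.foldl_cons, List.foldl_map]
    have hfun : (fun (x : List Char) (y : Nat) =>
        if Nat.succ y * cols + col < base.length then x ++ [base.getD (Nat.succ y * cols + col) ' ']
        else x)
      = (fun (x : List Char) (y : Nat) =>
        if y * cols + (col + cols) < base.length then x ++ [base.getD (y * cols + (col + cols)) ' ']
        else x) := by
      funext x y
      have h : Nat.succ y * cols + col = y * cols + (col + cols) := by
        rw [Nat.succ_eq_add_one]; ring
      rw [h]
    rw [hfun]
    by_cases hcol : col < base.length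
    · rw [ih (col + cols) _ (by omega)]
      rw [pv_pyRangePos_cons (col : Int) _ (cols : Int) (by exact_mod_cast hc)
        (by exact_mod_cast hcol)]
      simp only [List.map_cons, PySem.List.pyGetD_natCast]
      rw [if_pos (by omega : 0 * cols + col < base.length)]
      have h0 : (0 : Nat) * cols + col = col := by omega
      rw [h0]
      have hcc : (col : Int) + (cols : Int) = ((col + cols : Nat) : Int) := by push_cast; ring
      rw [hcc]
      simp
    · rw [if_neg (by omega : ¬ (0 * cols + col < base.length))]
      rw [ih (col + cols) _ (by omega)]
      rw [pv_pyRangePos_nil (col : Int) _ (cols : Int) (by exact_mod_cast hc) (by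
        simp only [Nat.cast_le]
        omega)]
      rw [pv_pyRangePos_nil _ _ (cols : Int) (by exact_mod_cast hc) (by push_cast; omega)]

lemma pv_order_mem (kw : List Char) (col : Int) (h : col ∈ pvOrder kw) :
    0 ≤ col ∧ col < (kw.length : Int) := by
  unfold pvOrder at h
  rcases List.mem_map.mp h with ⟨p, hp, rfl⟩
  have hp' : p ∈ (PySem.List.enumerate kw).map (fun q => (q.2, q.1)) :=
    (PySem.List.sorted_perm _ _ _).subset hp
  rcases List.mem_map.mp hp' with ⟨q, hq, rfl⟩
  have h1 : q.1 ∈ (PySem.List.enumerate kw).map (fun x => x.1) := List.mem_map_of_mem hq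
  rw [PySem.List.map_fst_enumerate] at h1
  have h2 := PySem.List.mem_pyRange_one.mp h1
  simp only [zero_add] at h2
  exact ⟨h2.1, h2.2⟩

-- the two ports agree
lemma pv_main (keyword alphabet : String) :
    create_keyed_alphabet keyword alphabet = create_keyed_alphabet_alt keyword alphabet := by
  unfold create_keyed_alphabet create_keyed_alphabet_alt
  by_cases hc : (pvKw keyword).length = 0
  · simp [hc]
  · simp only [hc, if_neg, not_false_iff]
    set kw := pvKw keyword with hkw
    set base : List Char := kw ++ pvRemaining kw alphabet with hbase
    set cols := kw.length with hcols
    set rows := (base.length + cols - 1) / cols with hrows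
    have hcpos : 0 < cols := Nat.pos_of_ne_zero hc
    have hcov : base.length ≤ rows * cols := by
      have hdm := Nat.div_add_mod (base.length + cols - 1) cols
      have hrc : rows * cols = cols * ((base.length + cols - 1) / cols) := by
        rw [hrows]; ring
      have hml : (base.length + cols - 1) % cols < cols := Nat.mod_lt _ hcpos
      have hnc : cols ≤ base.length := by
        rw [hbase]
        simp [hcols]
      omega
    congr 1
    rw [pv_fill base cols rows hcpos rows (le_refl _)]
    have hblockmap : (List.range rows).map
        (fun i => if i < rows then pvRowF base cols i else pvBlank cols)
      = (List.range rows).map (fun i => pvRowF base cols i) :=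
      List.map_congr_left (fun i hi => by rw [if_pos (List.mem_range.mp hi)])
    rw [hblockmap]
    apply PySem.List.foldl_congr_mem
    intro acc col hcol
    obtain ⟨hc0, hc1⟩ := pv_order_mem kw col hcol
    obtain ⟨c0, rfl⟩ := Int.eq_ofNat_of_zero_le hc0
    have hc0c : c0 < cols := by exact_mod_cast hc1
    rw [PySem.List.pyRange_zero, List.foldl_map]
    simp only [Int.toNat_natCast]
    rw [PySem.List.foldl_congr_mem _ _
      (fun acc2 i => if i * cols + c0 < base.length then acc2 ++ [base.getD (i * cols + c0) ' ']
        else acc2) acc ?_]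
    · exact pv_colEq base cols hcpos rows c0 acc (by omega)
    · intro acc2 i hi
      have hir : i < rows := List.mem_range.mp hi
      have hblock : PySem.List.pyGetD ((List.range rows).map (fun i => pvRowF base cols i))
          ((i : Nat) : Int) [] = pvRowF base cols i := by
        rw [PySem.List.pyGetD_of_nonneg _ _ (by positivity), Int.toNat_natCast,
          List.getD_eq_getElem _ _ (by simpa using hir)]
        simp
      have hcell : PySem.List.pyGetD (pvRowF base cols i) ((c0 : Nat) : Int) "" =
          (if i * cols + c0 < base.length then String.ofList [base.getD (i * cols + c0) ' ']
            else "") := by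
        rw [PySem.List.pyGetD_of_nonneg _ _ (by positivity), Int.toNat_natCast,
          List.getD_eq_getElem _ _ (by simpa [pvRowF] using hc0c)]
        simp [pvRowF]
      simp only [hblock, hcell]
      by_cases hidx : i * cols + c0 < base.length
      · simp [hidx, hir, hc0c, pvRowF]
      · simp [hidx, hir, hc0c, pvRowF]

-- ===== VERDICT (by name: the statement is the Claim_ definition above) =====
theorem create_keyed_alphabet_spec : Claim_equal_create_keyed_alphabet := by
  intro keyword alphabet _
  unfold Spec_create_keyed_alphabet
  exact pv_main keyword alphabet
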